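-- pv_equiv track=rewrite | github.com/acsicuib/MARIO | multi-agent-policies/scenarios/TaxiRome/test_data_on_topology.py | generateAllLevels
-- ===== SOURCE A (Python) =====
-- def generateAllLevels(size):
--     ls = [size]
--     v = size // 2
--     while v >= 2:
--         ls.append(v)
--         v = v // 2
--     ls.append(0)
--     return ls
-- ===== SOURCE B (Python) =====
-- def generateAllLevels(size):
--     if size < 4:
--         return [size, 0]
--     out = [0]
--     for i in range(size.bit_length() - 2, 0, -1):
--         out.append(size >> i)
--     out.append(size)
--     out.reverse()
--     return out
-- ===== Notes on version B (the rewrite author's own statement) =====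
-- stated objective: alternative
-- what changed: Replaces the sequential halving loop by a back-to-front construction: after an early return for small sizes, a descending index loop appends the closed-form shifts size >> i with the loop count precomputed from bit_length (no per-element test), and one final reverse yields the list.
import Mathlib
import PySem

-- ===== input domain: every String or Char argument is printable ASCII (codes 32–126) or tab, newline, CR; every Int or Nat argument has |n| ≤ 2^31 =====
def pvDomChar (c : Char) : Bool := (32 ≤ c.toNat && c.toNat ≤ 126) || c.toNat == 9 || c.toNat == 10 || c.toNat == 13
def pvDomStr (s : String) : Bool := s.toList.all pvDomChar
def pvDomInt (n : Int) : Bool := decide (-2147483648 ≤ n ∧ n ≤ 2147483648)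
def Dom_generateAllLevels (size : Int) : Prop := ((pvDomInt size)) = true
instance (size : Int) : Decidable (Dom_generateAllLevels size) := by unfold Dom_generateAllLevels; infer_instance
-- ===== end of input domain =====

-- B returns early for size < 4 and otherwise builds the answer back-to-front (a descending
-- index loop appending closed-form shifts size >> i, terminated by a bit_length-derived count
-- instead of a per-element test, then one reverse); objective: alternative.

-- ===== PORT A =====
-- termination fact for A's while loop (cited by decreasing_by)
theorem pv_fd_lt {v : Int} (h : 2 ≤ v) : (PySem.Int.floordiv v 2).toNat < v.toNat := by
  have h1 : (1 : Int) ≤ PySem.Int.floordiv v 2 :=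
    (PySem.Int.le_floordiv_iff_mul_le (by norm_num)).mpr (by omega)
  have h2 : PySem.Int.floordiv v 2 < v :=
    (PySem.Int.floordiv_lt_iff_lt_mul (by norm_num)).mpr (by omega)
  omega

-- the 'while v >= 2' loop, state = (v, ls)
def generateAllLevelsLoop (v : Int) (ls : List Int) : List Int :=
  if h : 2 ≤ v then generateAllLevelsLoop (PySem.Int.floordiv v 2) (ls ++ [v]) else ls
termination_by v.toNat
decreasing_by exact pv_fd_lt h

def generateAllLevels (size : Int) : List Int :=
  generateAllLevelsLoop (PySem.Int.floordiv size 2) [size] ++ [0]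

-- ===== PORT B =====
-- Source B line by line: the early return, the descending loop 'for i in range(bit_length-2, 0, -1):
-- out.append(size >> i)' (Python's '>>' is Lean's '>>>' on Int; i ≥ 1 here so i.toNat is exact),
-- the final append of size and the reverse.
def generateAllLevels_alt (size : Int) : List Int :=
  if size < 4 then [size, 0]
  else
    (((PySem.List.pyRange ((PySem.Int.bitLength size : Int) - 2) 0 (-1)).foldl
      (fun acc i => acc ++ [size >>> i.toNat]) [0] ++ [size]).reverse)

-- ===== PRECONDITION & SPEC =====
def Spec_generateAllLevels (size : Int) (out : List Int) : Prop := out = generateAllLevels_alt size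
instance (size : Int) (out : List Int) : Decidable (Spec_generateAllLevels size out) := by unfold Spec_generateAllLevels; infer_instance

-- ===== CLAIM (what is proved, stated in full; the proofs are below) =====
def Claim_equal_generateAllLevels : Prop := ∀ (size : Int), Dom_generateAllLevels size → Spec_generateAllLevels size (generateAllLevels size)

-- ===== LEMMAS AND PROOFS =====

-- the loop only appends: accumulator splits off
theorem pv_loop_acc (n : Nat) : ∀ v : Int, v.toNat ≤ n → ∀ ls : List Int,
    generateAllLevelsLoop v ls = ls ++ generateAllLevelsLoop v [] := by
  induction n with
  | zero =>
    intro v hv ls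
    have h : ¬ (2 : Int) ≤ v := by omega
    rw [generateAllLevelsLoop, dif_neg h]
    rw [generateAllLevelsLoop, dif_neg h]
    simp
  | succ n ih =>
    intro v hv ls
    rw [generateAllLevelsLoop]
    conv_rhs => rw [generateAllLevelsLoop]
    by_cases h : 2 ≤ v
    · rw [dif_pos h, dif_pos h]
      have hlt := pv_fd_lt h
      rw [ih _ (by omega) (ls ++ [v]), ih _ (by omega) ([] ++ [v])]
      simp
    · rw [dif_neg h, dif_neg h]; simp

-- halving composes: (s // 2) // 2^i = s // 2^(i+1)
theorem pv_shift_comp (s : Int) (i : Nat) :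
    PySem.Int.floordiv (PySem.Int.floordiv s 2) (2 ^ i) = PySem.Int.floordiv s (2 ^ (i + 1)) := by
  have hb : (0 : Int) < 2 ^ (i + 1) := by positivity
  have hi : (0 : Int) < 2 ^ i := by positivity
  obtain ⟨h1, h2⟩ := (PySem.Int.floordiv_eq_iff_of_pos hb).mp
    (rfl : PySem.Int.floordiv s (2 ^ (i + 1)) = _)
  refine (PySem.Int.floordiv_eq_iff_of_pos hi).mpr ⟨?_, ?_⟩
  · refine (PySem.Int.le_floordiv_iff_mul_le (by norm_num)).mpr ?_
    calc PySem.Int.floordiv s (2 ^ (i + 1)) * 2 ^ i * 2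
        = PySem.Int.floordiv s (2 ^ (i + 1)) * 2 ^ (i + 1) := by ring
      _ ≤ s := h1
  · refine (PySem.Int.floordiv_lt_iff_lt_mul (by norm_num)).mpr ?_
    calc s < (PySem.Int.floordiv s (2 ^ (i + 1)) + 1) * 2 ^ (i + 1) := h2
      _ = (PySem.Int.floordiv s (2 ^ (i + 1)) + 1) * 2 ^ i * 2 := by ring

theorem pv_fd_one (s : Int) : PySem.Int.floordiv s 1 = s := by
  refine (PySem.Int.floordiv_eq_iff_of_pos (by norm_num)).mpr ⟨by omega, by omega⟩

theorem pv_bl_pos {s : Int} (h : 0 < s) : 1 ≤ PySem.Int.bitLength s := by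
  rw [PySem.Int.bitLength_of_pos h]; omega

-- the loop's output in closed form, for nonnegative start
theorem pv_levels (n : Nat) : ∀ s : Int, s.toNat ≤ n → 0 ≤ s →
    generateAllLevelsLoop s [] =
      (List.range' 0 (PySem.Int.bitLength s - 1)).map (fun i => PySem.Int.floordiv s (2 ^ i)) := by
  induction n with
  | zero =>
    intro s hn hs
    have h0 : s = 0 := by omega
    subst h0; rw [generateAllLevelsLoop]; rw [dif_neg (by omega)]; decide
  | succ n ih =>
    intro s hn hs
    by_cases h : 2 ≤ s
    · have hlt := pv_fd_lt h
      have hfd1 : (1 : Int) ≤ PySem.Int.floordiv s 2 :=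
        (PySem.Int.le_floordiv_iff_mul_le (by norm_num)).mpr (by omega)
      rw [generateAllLevelsLoop, dif_pos h, pv_loop_acc n _ (by omega),
        ih _ (by omega) (by omega)]
      have hbl : PySem.Int.bitLength s = PySem.Int.bitLength (PySem.Int.floordiv s 2) + 1 :=
        PySem.Int.bitLength_of_pos (by omega)
      have hblfd := pv_bl_pos (show (0:Int) < PySem.Int.floordiv s 2 by omega)
      have hk : PySem.Int.bitLength s - 1 = (PySem.Int.bitLength (PySem.Int.floordiv s 2) - 1) + 1 := by
        omega
      rw [hk, List.range'_succ]
      simp only [List.map_cons, pow_zero, pv_fd_one, List.range'_eq_map_range, List.map_map]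
      refine congrArg (s :: ·) (List.map_congr_left ?_)
      intro x _
      simp only [Function.comp_apply, Nat.zero_add, pv_shift_comp]
      have hx : 1 + x = x + 1 := by omega
      rw [hx]
    · interval_cases s
      · rw [generateAllLevelsLoop, dif_neg (by omega)]; decide
      · rw [generateAllLevelsLoop, dif_neg (by omega)]; decide

-- Python '>>' on a nonnegative int is floor division by the power of two
theorem pv_shr {s : Int} (hs : 0 ≤ s) (k : Nat) :
    s >>> k = PySem.Int.floordiv s (2 ^ k) := by
  obtain ⟨m, rfl⟩ := Int.eq_ofNat_of_zero_le hs
  have h1 : ((m : Int)) >>> k = ((m >>> k : Nat) : Int) := by exact_mod_cast rfl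
  have h2 : PySem.Int.floordiv (m : Int) ((2 ^ k : Nat) : Int) = ((m / 2 ^ k : Nat) : Int) :=
    PySem.Int.floordiv_natCast m (2 ^ k)
  rw [h1, Nat.shiftRight_eq_div_pow,
    show ((2 : Int) ^ k) = ((2 ^ k : Nat) : Int) by push_cast; ring, h2]

-- append-fold splits into map
theorem pv_foldl_append (f : Int → Int) (L : List Int) : ∀ init : List Int,
    L.foldl (fun acc i => acc ++ [f i]) init = init ++ L.map f := by
  induction L with
  | nil => intro init; simp
  | cons a t ih => intro init; simp [List.foldl_cons, ih]

-- ===== VERDICT (by name: the statement is the Claim_ definition above) =====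
theorem generateAllLevels_spec : Claim_equal_generateAllLevels := by
  intro size _
  unfold Spec_generateAllLevels generateAllLevels generateAllLevels_alt
  by_cases h4 : size < 4
  · -- the loop body never runs: size //2 < 2
    have hfd : PySem.Int.floordiv size 2 < 2 :=
      (PySem.Int.floordiv_lt_iff_lt_mul (by norm_num)).mpr (by omega)
    rw [generateAllLevelsLoop, dif_neg (by omega), if_pos h4]
    rfl
  · -- size ≥ 4: loop closed form on the A side, reversed descending shifts on the B side
    have h2 : (2 : Int) ≤ size := by omega
    have hfd1 : (1 : Int) ≤ PySem.Int.floordiv size 2 :=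
      (PySem.Int.le_floordiv_iff_mul_le (by norm_num)).mpr (by omega)
    rw [pv_loop_acc (PySem.Int.floordiv size 2).toNat _ (le_refl _),
      pv_levels (PySem.Int.floordiv size 2).toNat _ (le_refl _) (by omega), if_neg h4]
    have hbl : PySem.Int.bitLength size = PySem.Int.bitLength (PySem.Int.floordiv size 2) + 1 :=
      PySem.Int.bitLength_of_pos (by omega)
    set b := PySem.Int.bitLength size with hbdef
    have hb3 : 3 ≤ b := by
      by_contra hc
      have h1 := PySem.Int.lt_two_pow_bitLength size
      rw [← hbdef] at h1
      have hle : (2 : Nat) ^ b ≤ 2 ^ 2 := Nat.pow_le_pow_right (by norm_num) (by omega)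
      omega
    have hmid : PySem.Int.bitLength (PySem.Int.floordiv size 2) - 1 = b - 2 := by omega
    have hrev : PySem.List.pyRange ((b : Int) - 2) 0 (-1) =
        (PySem.List.pyRange 1 ((b : Int) - 1) 1).reverse := by
      rw [PySem.List.pyRange_neg_one_eq_reverse]
      norm_num
      congr 1
      omega
    rw [hrev, pv_foldl_append (fun i => size >>> (i.toNat : Int))]
    have hone : PySem.List.pyRange 1 ((b : Int) - 1) 1 =
        (List.range (b - 2)).map (fun k : Nat => 1 + (k : Int)) := by
      rw [PySem.List.pyRange_one, show (((b : Int) - 1) - 1).toNat = b - 2 by omega]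
    rw [hmid, hone]
    simp only [List.map_reverse, List.map_map, List.reverse_append, List.reverse_cons,
      List.reverse_nil, List.nil_append, List.reverse_reverse, List.range'_eq_map_range,
      List.map_map, List.cons_append]
    refine congrArg (fun L => size :: (L ++ [0])) (List.map_congr_left ?_)
    intro k hk
    simp only [Function.comp_apply, Nat.zero_add, pv_shift_comp]
    rw [show ((1 : Int) + (k : Int)).toNat = k + 1 by omega]
    rw [Int.shiftRight_natCast_right size (k + 1)]
    rw [pv_shr (by omega : (0:Int) ≤ size) (k + 1)]
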